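-- pv_equiv track=rewrite | github.com/VelitskyLev-Coder/AggregationMathProject | mas_radius.py | iterate_with_step_integers
-- ===== SOURCE A (Python) =====
-- def iterate_with_step_integers(x1: int, x2: int, n: int) -> list[int]:
--     total_range = x2 - x1
--     base_step = total_range // (n - 1)
--     remainder = total_range % (n - 1)
--
--     result = []
--     current_value = x1
--
--     for i in range(n):
--         result.append(current_value)
--         # Distribute the remainder across the first few steps
--         if i < remainder:
--             current_value += base_step + 1
--         else:
--             current_value += base_step
--
--     return result
-- ===== SOURCE B (Python) =====
-- def iterate_with_step_integers(x1: int, x2: int, n: int) -> list[int]: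
--     total_range = x2 - x1
--     base_step = total_range // (n - 1)
--     remainder = total_range % (n - 1)
--     big = [x1 + i * (base_step + 1) for i in range(remainder)]
--     small = [x1 + remainder + i * base_step for i in range(remainder, n)]
--     return big + small
-- ===== Notes on version B (the rewrite author's own statement) =====
-- stated objective: alternative
-- what changed: Replaces A's running-accumulator loop by building the result as the concatenation of two arithmetic progressions: the first 'remainder' elements with step base_step+1 and the remaining ones (offset by remainder) with step base_step.
import Mathlib
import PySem

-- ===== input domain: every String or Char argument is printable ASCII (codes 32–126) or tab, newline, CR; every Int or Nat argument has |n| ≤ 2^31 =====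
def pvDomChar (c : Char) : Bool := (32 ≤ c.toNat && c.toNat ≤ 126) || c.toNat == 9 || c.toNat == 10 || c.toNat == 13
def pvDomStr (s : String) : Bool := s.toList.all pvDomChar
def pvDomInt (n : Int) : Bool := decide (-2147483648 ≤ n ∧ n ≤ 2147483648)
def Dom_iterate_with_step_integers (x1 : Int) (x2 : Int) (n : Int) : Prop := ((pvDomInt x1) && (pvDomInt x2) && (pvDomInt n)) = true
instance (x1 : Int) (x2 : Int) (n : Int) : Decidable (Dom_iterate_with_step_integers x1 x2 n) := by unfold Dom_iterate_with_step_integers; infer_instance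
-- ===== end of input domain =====

-- B replaces A's running-accumulator loop by concatenating two arithmetic progressions (objective: alternative decomposition).

-- ===== PORT A =====
def iterate_with_step_integers (x1 : Int) (x2 : Int) (n : Int) : List Int :=
  let total_range := x2 - x1
  let base_step := PySem.Int.floordiv total_range (n - 1)
  let remainder := PySem.Int.mod total_range (n - 1)
  let st := (PySem.List.pyRange 0 n 1).foldl
    (fun (s : List Int × Int) i =>
      (s.1 ++ [s.2], if i < remainder then s.2 + base_step + 1 else s.2 + base_step))
    ([], x1)
  st.1

-- ===== PORT B =====
def iterate_with_step_integers_alt (x1 : Int) (x2 : Int) (n : Int) : List Int :=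
  let total_range := x2 - x1
  let base_step := PySem.Int.floordiv total_range (n - 1)
  let remainder := PySem.Int.mod total_range (n - 1)
  let big := (PySem.List.pyRange 0 remainder 1).map (fun i => x1 + i * (base_step + 1))
  let small := (PySem.List.pyRange remainder n 1).map (fun i => x1 + remainder + i * base_step)
  big ++ small

-- ===== PRECONDITION & SPEC =====
-- Pre_ excludes exactly n = 1, where the Python A raises ZeroDivisionError on '// (n - 1)'.
def Pre_iterate_with_step_integers (x1 : Int) (x2 : Int) (n : Int) : Prop := n ≠ 1
instance (x1 : Int) (x2 : Int) (n : Int) : Decidable (Pre_iterate_with_step_integers x1 x2 n) := by unfold Pre_iterate_with_step_integers; infer_instance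
def pvWitness_iterate_with_step_integers : Int × Int × Int := (0, 10, 4)
def Spec_iterate_with_step_integers (x1 : Int) (x2 : Int) (n : Int) (out : List Int) : Prop := out = iterate_with_step_integers_alt x1 x2 n
instance (x1 : Int) (x2 : Int) (n : Int) (out : List Int) : Decidable (Spec_iterate_with_step_integers x1 x2 n out) := by unfold Spec_iterate_with_step_integers; infer_instance

-- ===== CLAIM =====
def Claim_equal_iterate_with_step_integers : Prop := ∀ (x1 : Int) (x2 : Int) (n : Int), Dom_iterate_with_step_integers x1 x2 n → Pre_iterate_with_step_integers x1 x2 n → Spec_iterate_with_step_integers x1 x2 n (iterate_with_step_integers x1 x2 n)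

-- ===== LEMMAS AND PROOFS =====

-- Loop invariant: after folding over 0..k-1 (for nonnegative remainder rem), the
-- accumulator list holds the closed-form values and the current value is x1 + k*base + min k rem.
theorem pv_fold_invariant (x1 base rem : Int) (hrem : 0 ≤ rem) (k : Nat) :
    (PySem.List.pyRange 0 (k : Int) 1).foldl
      (fun (s : List Int × Int) i =>
        (s.1 ++ [s.2], if i < rem then s.2 + base + 1 else s.2 + base))
      ([], x1)
    = ((PySem.List.pyRange 0 (k : Int) 1).map (fun i => x1 + i * base + min i rem),
       x1 + (k : Int) * base + min (k : Int) rem) := by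
  induction k with
  | zero => simp [PySem.List.pyRange_one_eq_nil]; omega
  | succ k ih =>
    have h1 : ((k : Int) + 1) = ((k + 1 : Nat) : Int) := by push_cast; ring
    have h2 : PySem.List.pyRange 0 ((k + 1 : Nat) : Int) 1
        = PySem.List.pyRange 0 (k : Int) 1 ++ [(k : Int)] := by
      rw [← h1, PySem.List.pyRange_one_succ_right (by positivity)]
    rw [h2, List.foldl_append, ih, List.map_append]
    simp only [List.foldl_cons, List.foldl_nil, List.map_cons, List.map_nil]
    rw [Prod.mk.injEq]
    refine ⟨rfl, ?_⟩
    rw [← h1]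
    split_ifs with h
    · have h3 : min (k : Int) rem = (k : Int) := by omega
      have h4 : min ((k : Int) + 1) rem = (k : Int) + 1 := by omega
      rw [h3, h4]; ring
    · have h3 : min (k : Int) rem = rem := by omega
      have h4 : min ((k : Int) + 1) rem = rem := by omega
      rw [h3, h4]; ring

-- The closed-form map over 0..n-1 splits into B's two progressions when 0 ≤ rem ≤ n.
theorem pv_closed_split (x1 base rem n : Int) (h0 : 0 ≤ rem) (h1 : rem ≤ n) :
    (PySem.List.pyRange 0 n 1).map (fun i => x1 + i * base + min i rem)
    = (PySem.List.pyRange 0 rem 1).map (fun i => x1 + i * (base + 1)) ++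
      (PySem.List.pyRange rem n 1).map (fun i => x1 + rem + i * base) := by
  rw [PySem.List.pyRange_one_append 0 rem n h0 h1, List.map_append]
  congr 1
  · apply List.map_congr_left
    intro i hi
    rw [PySem.List.mem_pyRange_one] at hi
    have : min i rem = i := by omega
    rw [this]; ring
  · apply List.map_congr_left
    intro i hi
    rw [PySem.List.mem_pyRange_one] at hi
    have : min i rem = rem := by omega
    rw [this]; ring

-- ===== VERDICT =====
theorem iterate_with_step_integers_spec : Claim_equal_iterate_with_step_integers := by
  intro x1 x2 n _ hpre
  unfold Spec_iterate_with_step_integers iterate_with_step_integers iterate_with_step_integers_alt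
  by_cases hn : n ≤ 0
  · -- both sides are empty: A folds over an empty range; B's two ranges are empty too
    have hneg : n - 1 < 0 := by omega
    have hb := PySem.Int.mod_neg_bounds (x2 - x1) hneg
    simp only []
    rw [PySem.List.pyRange_one_eq_nil hn,
        PySem.List.pyRange_one_eq_nil (by omega : PySem.Int.mod (x2 - x1) (n - 1) ≤ 0),
        PySem.List.pyRange_one_eq_nil (by omega : n ≤ PySem.Int.mod (x2 - x1) (n - 1))]
    simp
  · have hn2 : 2 ≤ n := by
      unfold Pre_iterate_with_step_integers at hpre; omega
    have hpos : (0:Int) < n - 1 := by omega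
    have hrem0 : 0 ≤ PySem.Int.mod (x2 - x1) (n - 1) := PySem.Int.mod_nonneg (x2 - x1) hpos
    have hremlt : PySem.Int.mod (x2 - x1) (n - 1) < n - 1 := PySem.Int.mod_lt (x2 - x1) hpos
    have hk : n = ((n.toNat : Int)) := by omega
    simp only []
    rw [hk]
    rw [congrArg Prod.fst
      (pv_fold_invariant x1 (PySem.Int.floordiv (x2 - x1) ((n.toNat : Int) - 1))
        (PySem.Int.mod (x2 - x1) ((n.toNat : Int) - 1)) (by rw [← hk]; exact hrem0) n.toNat)]
    exact pv_closed_split x1 _ _ _ (by rw [← hk]; exact hrem0) (by rw [← hk]; omega)
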